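-- pv_equiv track=rewrite | github.com/deniska/adventofcode | advent2016/a19.py | part2_iter
-- ===== SOURCE A (Python) =====
-- def part2_iter(count):
--     a = 2
--     b = 1
--     while a < count:
--         if b >= a:
--             b = 0
--         if b < (a+1)//2:
--             b += 1
--         else:
--             b += 2
--         a += 1
--     return b
-- ===== SOURCE B (Python) =====
-- def part2_iter(count):
--     if count <= 2:
--         return 1
--     p = 1
--     while p * 3 < count:
--         p *= 3
--     r = count - p
--     return r if r <= p else 2 * count - 3 * p
-- ===== Notes on version B (the rewrite author's own statement) =====
-- stated objective: faster
-- what changed: Replaced the O(n) survivor-tracking loop by the closed-form answer computed from the largest power of three below count.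
import Mathlib
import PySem

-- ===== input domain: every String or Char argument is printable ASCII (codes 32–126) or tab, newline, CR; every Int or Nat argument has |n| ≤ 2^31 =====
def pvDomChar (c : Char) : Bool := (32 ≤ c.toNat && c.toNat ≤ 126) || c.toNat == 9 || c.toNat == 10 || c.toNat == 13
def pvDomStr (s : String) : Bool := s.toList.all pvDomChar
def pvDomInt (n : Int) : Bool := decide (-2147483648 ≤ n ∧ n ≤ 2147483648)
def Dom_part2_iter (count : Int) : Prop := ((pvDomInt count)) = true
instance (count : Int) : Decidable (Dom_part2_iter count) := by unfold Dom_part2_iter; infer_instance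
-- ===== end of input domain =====

-- B replaces A's O(n) survivor-tracking loop by the O(log n) closed form via the largest power of 3 below count.


-- ===== PORT A =====
-- the while loop of A, state (a, b); the body is step for step A's body
def part2Loop (count a b : Int) : Int :=
  if _h : a < count then
    part2Loop count (a + 1)
      (if (if b ≥ a then 0 else b) < PySem.Int.floordiv (a + 1) 2
       then (if b ≥ a then 0 else b) + 1
       else (if b ≥ a then 0 else b) + 2)
  else b
termination_by (count - a).toNat
decreasing_by omega

def part2_iter (count : Int) : Int := part2Loop count 2 1

-- ===== PORT B =====
-- Source B's 'while p * 3 < count: p *= 3' (the '1 ≤ p' conjunct only makes termination provable;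
-- every call site has p ≥ 1, so it never changes the computation)
def lpow3 (count p : Int) : Int :=
  if _h : p * 3 < count ∧ 1 ≤ p then lpow3 count (p * 3) else p
termination_by (count - p).toNat
decreasing_by omega

def part2_iter_alt (count : Int) : Int :=
  if count ≤ 2 then 1
  else if count - lpow3 count 1 ≤ lpow3 count 1 then count - lpow3 count 1
  else 2 * count - 3 * lpow3 count 1

-- ===== PRECONDITION & SPEC =====
def Spec_part2_iter (count : Int) (out : Int) : Prop := out = part2_iter_alt count
instance (count : Int) (out : Int) : Decidable (Spec_part2_iter count out) := by unfold Spec_part2_iter; infer_instance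

-- ===== CLAIM (what is proved, stated in full; the proofs are below) =====
def Claim_equal_part2_iter : Prop := ∀ (count : Int), Dom_part2_iter count → Spec_part2_iter count (part2_iter count)

-- ===== LEMMAS AND PROOFS =====

-- the power-of-3 search: result is a power of 3, with n ≤ 3r, p ≤ r, and r < n whenever p < n
theorem lpow3_spec (n p : Int) : 1 ≤ p → (∃ k : ℕ, p = (3 : ℤ) ^ k) →
    (∃ k : ℕ, lpow3 n p = (3 : ℤ) ^ k) ∧ n ≤ 3 * lpow3 n p ∧ p ≤ lpow3 n p ∧
      (p < n → lpow3 n p < n) := by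
  induction p using lpow3.induct (count := n) with
  | case1 p h ih =>
    intro h1 hk
    rw [lpow3, dif_pos h]
    obtain ⟨k, hkk⟩ := hk
    obtain ⟨hpow, hle, hpp, hlt⟩ := ih (by omega) ⟨k + 1, by rw [pow_succ]; omega⟩
    exact ⟨hpow, hle, by omega, fun _ => hlt (by omega)⟩
  | case2 p h =>
    intro h1 hk
    rw [lpow3, dif_neg h]
    have hn : ¬ p * 3 < n := fun hc => h ⟨hc, h1⟩
    exact ⟨hk, by omega, le_refl _, fun hp => hp⟩

-- two powers of 3 in the window (q, 3q] containing n coincide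
theorem pow3_unique (i j : ℕ) (n : Int)
    (h1 : (3 : ℤ) ^ i < n) (h2 : n ≤ 3 * 3 ^ i)
    (h3 : (3 : ℤ) ^ j < n) (h4 : n ≤ 3 * 3 ^ j) : (3 : ℤ) ^ i = (3 : ℤ) ^ j := by
  rcases lt_trichotomy i j with h | h | h
  · have : (3 : ℤ) ^ (i + 1) ≤ 3 ^ j := pow_le_pow_right₀ (by norm_num) (by omega)
    rw [pow_succ] at this; omega
  · rw [h]
  · have : (3 : ℤ) ^ (j + 1) ≤ 3 ^ i := pow_le_pow_right₀ (by norm_num) (by omega)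
    rw [pow_succ] at this; omega

-- B's closed form satisfies A's one-step recurrence
theorem alt_step (a : Int) (ha : 2 ≤ a) :
    part2_iter_alt (a + 1) =
      (if (if part2_iter_alt a ≥ a then 0 else part2_iter_alt a) < PySem.Int.floordiv (a + 1) 2
       then (if part2_iter_alt a ≥ a then 0 else part2_iter_alt a) + 1
       else (if part2_iter_alt a ≥ a then 0 else part2_iter_alt a) + 2) := by
  have hfd : PySem.Int.floordiv (a + 1) 2 = (a + 1) / 2 :=
    PySem.Int.floordiv_eq_ediv_of_pos (by omega)
  rcases eq_or_lt_of_le ha with h2 | h3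
  · -- a = 2 : both sides are 3
    have l3 : lpow3 3 1 = 1 := by rw [lpow3]; norm_num
    subst h2
    have e3 : part2_iter_alt (2 + 1) = 3 := by
      show part2_iter_alt 3 = 3
      unfold part2_iter_alt
      rw [l3]; norm_num
    have e2 : part2_iter_alt 2 = 1 := by unfold part2_iter_alt; norm_num
    rw [e3, e2, hfd]; norm_num
  · -- a ≥ 3
    obtain ⟨⟨i, hi⟩, hple, hpp, hplt⟩ := lpow3_spec a 1 le_rfl ⟨0, rfl⟩
    obtain ⟨⟨j, hj⟩, hqle, hqp, hqlt⟩ := lpow3_spec (a + 1) 1 le_rfl ⟨0, rfl⟩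
    set p := lpow3 a 1 with hp
    set q := lpow3 (a + 1) 1 with hq
    have hplt' : p < a := hplt (by omega)
    have hqval : q = if a = 3 * p then 3 * p else p := by
      by_cases h33 : a = 3 * p
      · rw [if_pos h33]
        have e : (3 : ℤ) ^ (i + 1) = 3 ^ i * 3 := pow_succ 3 i
        have := pow3_unique j (i + 1) (a + 1) (by omega) (by omega) (by omega) (by omega)
        omega
      · rw [if_neg h33]
        have := pow3_unique j i (a + 1) (by omega) (by omega) (by omega) (by omega)
        omega
    unfold part2_iter_alt
    rw [← hp, ← hq, hfd, hqval]
    rw [if_neg (show ¬ a + 1 ≤ 2 by omega), if_neg (show ¬ a ≤ 2 by omega)]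
    split_ifs <;> omega

-- loop invariant: the loop state b equals B's value at a
theorem loop_inv (count : Int) : ∀ a b : Int, 2 ≤ a → a ≤ count →
    b = part2_iter_alt a → part2Loop count a b = part2_iter_alt count := by
  intro a b
  induction a, b using part2Loop.induct (count := count) with
  | case1 a b h ih =>
    intro ha _ hb
    rw [part2Loop, dif_pos h]
    refine ih (by omega) (by omega) ?_
    rw [hb, alt_step a ha]
    simp only [dite_eq_ite]
  | case2 a b h =>
    intro _ hac hb
    rw [part2Loop, dif_neg h]
    have : a = count := by omega
    rw [hb, this]

-- ===== VERDICT (by name: the statement is the Claim_ definition above) =====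
theorem part2_iter_spec : Claim_equal_part2_iter := by
  intro count _
  unfold Spec_part2_iter part2_iter
  by_cases h : count ≤ 2
  · rw [part2Loop, dif_neg (by omega)]
    unfold part2_iter_alt
    rw [if_pos h]
  · have e2 : part2_iter_alt 2 = 1 := by unfold part2_iter_alt; norm_num
    exact loop_inv count 2 1 le_rfl (by omega) e2.symm
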